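-- pv_equiv track=rewrite | github.com/thedejijoseph/jack | app/resource.py | serve
-- ===== SOURCE A (Python) =====
-- import types
--
-- def serve(bowls):
-- 	"""Re-orders argument alphabetically.
-- 	serve(arg) >> sorted_list
-- 	Where arg could be a generator or a list.
-- 	"""
-- 	queue = []
--
-- 	if isinstance(bowls, types.GeneratorType):
-- 		# arg is a generator
-- 		# already cut into bowls of same size
-- 		for bowl in bowls:
-- 			if bowl is []:
-- 				pass
-- 			bl = list(set(bowl))
-- 			bl.sort()
-- 			queue.extend(bl)
-- 		return queue
--
-- 	# not a generator
-- 	# cut list into lists of words the same size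
-- 	# [['ae', 'ea'], ['eat', 'tea'], [4], [5], ...]
--
-- 	stretch = 0
-- 	for i in bowls:
-- 		if len(i) > stretch:
-- 			stretch = len(i)
--
-- 	for i in range(2, stretch + 1):
-- 		grp = [x for x in filter(lambda k: True if i == len(k) else False, bowls)]
-- 		grp.sort()
-- 		queue.extend(grp)
--
-- 	return queue
-- ===== SOURCE B (Python) =====
-- def serve(bowls):
--     buckets = {}
--     for w in bowls:
--         buckets.setdefault(len(w), []).append(w)
--     out = []
--     for L in sorted(buckets):
--         if L >= 2:
--             out += sorted(buckets[L])
--     return out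
-- ===== Notes on version B (the rewrite author's own statement) =====
-- stated objective: faster
-- what changed: B buckets the strings by length into a dict in one pass and emits each sorted bucket in increasing key order (lengths >= 2), instead of A's one full filter pass over the whole list for every length from 2 up to the maximum.
import Mathlib
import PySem

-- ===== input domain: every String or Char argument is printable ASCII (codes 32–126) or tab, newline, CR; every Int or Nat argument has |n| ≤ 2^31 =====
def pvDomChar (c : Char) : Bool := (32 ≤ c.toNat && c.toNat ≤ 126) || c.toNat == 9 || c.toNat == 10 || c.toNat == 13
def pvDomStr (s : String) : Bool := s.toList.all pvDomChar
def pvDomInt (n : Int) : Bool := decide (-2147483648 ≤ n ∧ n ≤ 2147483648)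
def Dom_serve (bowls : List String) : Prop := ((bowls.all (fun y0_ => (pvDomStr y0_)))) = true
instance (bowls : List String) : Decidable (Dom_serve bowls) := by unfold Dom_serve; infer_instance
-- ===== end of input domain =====

-- B buckets the strings by length in ONE pass over the input instead of re-scanning the
-- whole list once per length from 2 to the maximum; objective: faster (asymptotic).
-- ===== PORT A =====
-- (the generator branch of the Python cannot arise for a List String argument; this is the list branch)
def serve (bowls : List String) : List String :=
  let queue : List String := []
  let stretch : Int :=
    bowls.foldl (fun stretch i => if PySem.Str.len i > stretch then PySem.Str.len i else stretch) 0
  (PySem.List.pyRange 2 (stretch + 1) 1).foldl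
    (fun queue i =>
      let grp := bowls.filter (fun k => if i == PySem.Str.len k then true else false)
      let grp := PySem.List.sorted grp (fun x => x)
      queue ++ grp)
    queue

-- ===== PORT B =====
def serve_alt (bowls : List String) : List String :=
  let buckets : PySem.Dict Int (List String) :=
    bowls.foldl (fun d w => d.modify (PySem.Str.len w) [] (fun b => b ++ [w])) PySem.Dict.empty
  (PySem.List.sorted buckets.keys (fun x => x)).foldl
    (fun out L =>
      if L >= 2 then out ++ PySem.List.sorted (buckets.getD L []) (fun x => x) else out)
    []

-- ===== PRECONDITION & SPEC =====
def Spec_serve (bowls : List String) (out : List String) : Prop := out = serve_alt bowls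
instance (bowls : List String) (out : List String) : Decidable (Spec_serve bowls out) := by unfold Spec_serve; infer_instance

-- ===== CLAIM (what is proved, stated in full; the proofs are below) =====
def Claim_equal_serve : Prop := ∀ (bowls : List String), Dom_serve bowls → Spec_serve bowls (serve bowls)

-- ===== LEMMAS AND PROOFS =====

-- a fold that conditionally appends a block is the flatMap over the filtered list
theorem pv_foldl_ite_append {α β : Type} (p : α → Prop) [DecidablePred p] (g : α → List β)
    (l : List α) (acc : List β) :
    l.foldl (fun q x => if p x then q ++ g x else q) acc
      = acc ++ (l.filter (fun x => decide (p x))).flatMap g := by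
  induction l generalizing acc with
  | nil => simp
  | cons x t ih =>
    by_cases h : p x <;> simp [h, ih, List.append_assoc]

-- elements whose block is empty can be dropped from a flatMap
theorem pv_flatMap_filter {α β : Type} (p : α → Bool) (g : α → List β) (l : List α)
    (h : ∀ x ∈ l, p x = false → g x = []) :
    l.flatMap g = (l.filter p).flatMap g := by
  induction l with
  | nil => rfl
  | cons x t ih =>
    rcases hx : p x with _ | _ <;>
      simp [hx, h x (by simp), ih (fun y hy => h y (by simp [hy])),
        List.flatMap_cons]

-- two strictly increasing integer lists with the same members are equal
theorem pv_pairwise_lt_ext (l₁ l₂ : List Int)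
    (h₁ : l₁.Pairwise (· < ·)) (h₂ : l₂.Pairwise (· < ·)) (h : ∀ x, x ∈ l₁ ↔ x ∈ l₂) :
    l₁ = l₂ := by
  refine List.Perm.eq_of_pairwise (fun a b _ _ hab hba => absurd hba (lt_asymm hab)) h₁ h₂ ?_
  refine (List.perm_ext_iff_of_nodup ?_ ?_).mpr h
  · exact h₁.imp ne_of_lt
  · exact h₂.imp ne_of_lt

-- the max-length fold of A bounds every length
theorem pv_stretch_spec (bowls : List String) :
    0 ≤ bowls.foldl (fun s i => if PySem.Str.len i > s then PySem.Str.len i else s) 0 ∧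
      ∀ w ∈ bowls,
        PySem.Str.len w ≤ bowls.foldl (fun s i => if PySem.Str.len i > s then PySem.Str.len i else s) 0 := by
  have hmax : bowls.foldl (fun s i => if PySem.Str.len i > s then PySem.Str.len i else s) 0
      = (bowls.map PySem.Str.len).foldl max 0 := by
    rw [List.foldl_map]
    refine PySem.List.foldl_congr_mem bowls _ _ 0 (fun acc x _ => ?_)
    generalize PySem.Str.len x = L
    by_cases h : acc < L
    · simp [h, max_eq_right h.le]
    · simp [h, max_eq_left (not_lt.mp h)]
  rw [hmax]
  obtain ⟨h0, hall⟩ := PySem.List.le_foldl_max (bowls.map PySem.Str.len) 0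
  exact ⟨h0, fun w hw => hall _ (List.mem_map_of_mem hw)⟩

-- the two filter predicates (i == len k vs len k == i) agree
theorem pv_filter_flip (bowls : List String) (i : Int) :
    bowls.filter (fun k => if i == PySem.Str.len k then true else false)
      = bowls.filter (fun k => PySem.Str.len k == i) := by
  refine List.filter_congr (fun k _ => ?_)
  generalize PySem.Str.len k = L
  by_cases h : i = L
  · simp [h]
  · simp [h, Ne.symm h]

-- B's bucket at key L is exactly the order-preserving filter of bowls by length L
theorem pv_bucket_spec (bowls : List String) (L : Int) :
    (bowls.foldl (fun d w => d.modify (PySem.Str.len w) [] (fun b => b ++ [w]))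
        (PySem.Dict.empty : PySem.Dict Int (List String))).getD L []
      = bowls.filter (fun w => PySem.Str.len w == L) := by
  have h := PySem.Dict.getD_foldl_modify_append (bowls.map (fun w => (PySem.Str.len w, w)))
      (PySem.Dict.empty : PySem.Dict Int (List String)) L
  rw [List.foldl_map] at h
  simpa [List.filter_map, Function.comp_def, List.map_filter] using h

-- B's key list is the ordered set of lengths
theorem pv_keys_spec (bowls : List String) :
    (bowls.foldl (fun d w => d.modify (PySem.Str.len w) [] (fun b => b ++ [w]))
        (PySem.Dict.empty : PySem.Dict Int (List String))).keys
      = PySem.Set.ofList (bowls.map PySem.Str.len) := by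
  have h := PySem.Dict.keys_foldl_modify_key bowls PySem.Str.len [] (fun _ w b => b ++ [w])
      (PySem.Dict.empty : PySem.Dict Int (List String))
  exact h

theorem pv_serve_eq (bowls : List String) : serve bowls = serve_alt bowls := by
  unfold serve serve_alt
  simp only []
  set S := bowls.foldl (fun s i => if PySem.Str.len i > s then PySem.Str.len i else s) 0 with hS
  obtain ⟨hS0, hSle⟩ := pv_stretch_spec bowls
  rw [← hS] at hS0 hSle
  set g : Int → List String :=
    fun i => PySem.List.sorted (bowls.filter (fun w => PySem.Str.len w == i)) (fun x => x) with hg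
  -- A's side
  have hA : (PySem.List.pyRange 2 (S + 1) 1).foldl
      (fun queue i =>
        queue ++ PySem.List.sorted
          (bowls.filter (fun k => if i == PySem.Str.len k then true else false)) (fun x => x)) []
      = (PySem.List.pyRange 2 (S + 1) 1).flatMap g := by
    rw [PySem.List.foldl_append_eq_flatMap, List.nil_append]
    refine List.flatMap_congr (fun i _ => ?_)
    rw [hg, pv_filter_flip]
  -- B's side
  have hB : (PySem.List.sorted
        ((bowls.foldl (fun d w => d.modify (PySem.Str.len w) [] (fun b => b ++ [w]))
            (PySem.Dict.empty : PySem.Dict Int (List String))).keys) (fun x => x)).foldl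
      (fun out L =>
        if L >= 2 then
          out ++ PySem.List.sorted
            ((bowls.foldl (fun d w => d.modify (PySem.Str.len w) [] (fun b => b ++ [w]))
                (PySem.Dict.empty : PySem.Dict Int (List String))).getD L []) (fun x => x)
        else out) []
      = ((PySem.List.sorted (PySem.Set.ofList (bowls.map PySem.Str.len)) (fun x => x)).filter
          (fun L => decide (L ≥ 2))).flatMap g := by
    rw [pv_keys_spec, pv_foldl_ite_append, List.nil_append]
    refine List.flatMap_congr (fun L _ => ?_)
    rw [hg, pv_bucket_spec]
  rw [hA, hB]
  -- drop the absent lengths from A's range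
  have hdrop : (PySem.List.pyRange 2 (S + 1) 1).flatMap g
      = ((PySem.List.pyRange 2 (S + 1) 1).filter
          (fun i => decide (i ∈ bowls.map PySem.Str.len))).flatMap g := by
    refine pv_flatMap_filter _ g _ (fun x _ hx => ?_)
    simp only [decide_eq_false_iff_not] at hx
    have hnone : bowls.filter (fun w => PySem.Str.len w == x) = [] := by
      rw [List.filter_eq_nil_iff]
      intro w hw hbeq
      exact hx (List.mem_map.mpr ⟨w, hw, by simpa using hbeq⟩)
    simp only [hg]
    rw [hnone]
    rfl
  rw [hdrop]
  -- the two index lists coincide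
  congr 1
  refine pv_pairwise_lt_ext _ _ ?_ ?_ ?_
  · refine List.Pairwise.filter _ ?_
    rw [PySem.List.pyRange_of_pos 2 (S + 1) Int.zero_lt_one]
    exact List.pairwise_lt_range.map _ (fun a b hab => by omega)
  · exact List.Pairwise.filter _ (PySem.List.sorted_ofList_pairwise_lt _)
  · intro x
    simp only [List.mem_filter, PySem.List.mem_pyRange_one, PySem.List.mem_sorted,
      PySem.Set.mem_ofList, decide_eq_true_eq, ge_iff_le]
    constructor
    · rintro ⟨⟨h2, _⟩, hx⟩; exact ⟨by simpa using hx, h2⟩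
    · rintro ⟨hx, h2⟩
      obtain ⟨w, hw, rfl⟩ := List.mem_map.mp hx
      exact ⟨⟨h2, by have := hSle w hw; omega⟩, by simpa using hx⟩

-- ===== VERDICT (by name: the statement is the Claim_ definition above) =====
theorem serve_spec : Claim_equal_serve := by
  intro bowls _
  unfold Spec_serve
  exact pv_serve_eq bowls
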